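-- pv_equiv track=rewrite | github.com/AZHSQ/Test | IE_master/compression/arnold.py | arnold_decode
-- ===== SOURCE A (Python) =====
-- def arnold_decode(matrix, a, b, iterations):
--     width = len(matrix)
--     height = len(matrix[0])
--     N = len(matrix[0])
--     for _ in range(iterations):
--         new_matrix = [[0] * N for _ in range(N)]
--         for x in range(width):
--             for y in range(height):
--                 new_x = ((a * b + 1) * x - b * y) % N
--                 new_y = (-(a * x) + y) % N
--                 new_matrix[new_x][new_y] = matrix[x][y]
--         matrix = new_matrix
--     return matrix
-- ===== SOURCE B (Python) =====
-- def arnold_decode(matrix, a, b, iterations):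
--     if iterations <= 0:
--         return matrix
--     N = len(matrix)
--
--     def mul(P, Q):
--         return [[(P[0][0] * Q[0][0] + P[0][1] * Q[1][0]) % N,
--                  (P[0][0] * Q[0][1] + P[0][1] * Q[1][1]) % N],
--                 [(P[1][0] * Q[0][0] + P[1][1] * Q[1][0]) % N,
--                  (P[1][0] * Q[0][1] + P[1][1] * Q[1][1]) % N]]
--
--     # P = S^iterations mod N, where S = [[1, b], [a, a*b+1]] is the inverse
--     # of one forward step; computed by square-and-multiply.
--     P = [[1 % N, 0], [0, 1 % N]]
--     S = [[1 % N, b % N], [a % N, (a * b + 1) % N]]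
--     k = iterations
--     while k > 0:
--         if k & 1:
--             P = mul(P, S)
--         S = mul(S, S)
--         k >>= 1
--     return [[matrix[(P[0][0] * u + P[0][1] * v) % N][(P[1][0] * u + P[1][1] * v) % N]
--              for v in range(N)]
--             for u in range(N)]
-- ===== Notes on version B (the rewrite author's own statement) =====
-- stated objective: faster
-- what changed: Instead of applying the inverse Arnold cat map iteration by iteration (each a full N x N scatter pass), B raises the 2x2 inverse transform matrix to the power 'iterations' mod N by square-and-multiply and fills the output in a single gather pass.
-- outside the precondition, e.g. on arnold_decode([[1, 2]], 1, 1, 1): A returns [[1, 0], [0, 2]], B returns [[1]]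
import Mathlib
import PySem

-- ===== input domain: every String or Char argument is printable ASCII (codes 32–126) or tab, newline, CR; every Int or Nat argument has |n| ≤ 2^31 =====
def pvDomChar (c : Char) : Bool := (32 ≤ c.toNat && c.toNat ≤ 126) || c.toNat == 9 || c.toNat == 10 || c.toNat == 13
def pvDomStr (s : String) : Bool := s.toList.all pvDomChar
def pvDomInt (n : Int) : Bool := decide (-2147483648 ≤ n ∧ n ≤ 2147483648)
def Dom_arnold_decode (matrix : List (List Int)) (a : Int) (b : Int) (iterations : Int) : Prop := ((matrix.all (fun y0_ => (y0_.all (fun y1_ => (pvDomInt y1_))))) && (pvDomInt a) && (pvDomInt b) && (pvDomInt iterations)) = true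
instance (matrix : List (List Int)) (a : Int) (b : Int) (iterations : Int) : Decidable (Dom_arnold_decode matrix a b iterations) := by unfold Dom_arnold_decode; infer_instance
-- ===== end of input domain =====

-- B replaces A's per-iteration O(N^2) scatter passes by one mod-N power of the 2x2 inverse
-- transform (square-and-multiply) followed by a single gather pass (objective: faster).

-- ===== PORT A =====
-- matrix[x][y] read / new_matrix[i][j] = v write; indices here are in range under Pre_,
-- where % N with N > 0 is nonnegative, so .toNat is exact.
def pvGetCell (m : List (List Int)) (i j : Nat) : Int := (m.getD i []).getD j 0

def pvSetCell (m : List (List Int)) (i j : Nat) (v : Int) : List (List Int) :=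
  m.set i ((m.getD i []).set j v)

-- one pass of A's outer `for _ in range(iterations)` body (width/height/N fixed outside)
def pvStepA (a b : Int) (width height N : Nat) (matrix : List (List Int)) : List (List Int) :=
  (List.range width).foldl (fun acc (x : Nat) =>
    (List.range height).foldl (fun acc2 (y : Nat) =>
      pvSetCell acc2 ((((a * b + 1) * (x : Int) - b * (y : Int)) % (N : Int)).toNat)
        (((-(a * (x : Int)) + (y : Int)) % (N : Int)).toNat)
        (pvGetCell matrix x y)) acc)
    (List.replicate N (List.replicate N 0))

def arnold_decode (matrix : List (List Int)) (a : Int) (b : Int) (iterations : Int) : List (List Int) :=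
  let width := matrix.length
  let height := (matrix.headD []).length
  let N := (matrix.headD []).length
  (fun m => pvStepA a b width height N m)^[iterations.toNat] matrix

-- ===== PORT B =====
-- 2x2 matrix ((p11, p12), (p21, p22)); pvMul is Source B's `mul` (entries reduced mod N)
def pvMul (N : Int) (P Q : (Int × Int) × (Int × Int)) : (Int × Int) × (Int × Int) :=
  (((P.1.1 * Q.1.1 + P.1.2 * Q.2.1) % N, (P.1.1 * Q.1.2 + P.1.2 * Q.2.2) % N),
   ((P.2.1 * Q.1.1 + P.2.2 * Q.2.1) % N, (P.2.1 * Q.1.2 + P.2.2 * Q.2.2) % N))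

-- Source B's `while k > 0` square-and-multiply loop, state (P, S, k)
def pvBinpow (N : Int) (P S : (Int × Int) × (Int × Int)) : Nat → (Int × Int) × (Int × Int)
  | 0 => P
  | (k + 1) =>
      pvBinpow N (if (k + 1) % 2 = 1 then pvMul N P S else P) (pvMul N S S) ((k + 1) / 2)
  decreasing_by omega

def arnold_decode_alt (matrix : List (List Int)) (a : Int) (b : Int) (iterations : Int) : List (List Int) :=
  if iterations ≤ 0 then matrix
  else
    let N : Int := (matrix.length : Int)
    let P := pvBinpow N ((1 % N, 0), (0, 1 % N)) ((1 % N, b % N), (a % N, (a * b + 1) % N))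
      iterations.toNat
    (List.range matrix.length).map (fun (u : Nat) =>
      (List.range matrix.length).map (fun (v : Nat) =>
        pvGetCell matrix ((P.1.1 * (u : Int) + P.1.2 * (v : Int)) % N).toNat
          ((P.2.1 * (u : Int) + P.2.2 * (v : Int)) % N).toNat))

-- ===== PRECONDITION & SPEC =====
-- Pre_ asks the matrix to be nonempty and, when at least one iteration runs, square.
-- On an empty matrix A raises IndexError; on a non-square matrix with iterations >= 1 A either
-- raises IndexError (a row shorter than row 0, or width > N on the second iteration) or returns
-- an N x N matrix zero-padded/truncated to the first row's length — an artefact of scattering a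
-- width x height block through an N x N buffer, which is excluded here as accidental behaviour.
def Pre_arnold_decode (matrix : List (List Int)) (a : Int) (b : Int) (iterations : Int) : Prop :=
  matrix ≠ [] ∧ (iterations ≤ 0 ∨
    (matrix.length = (matrix.headD []).length ∧
      ∀ r ∈ matrix, r.length = (matrix.headD []).length))

instance (matrix : List (List Int)) (a : Int) (b : Int) (iterations : Int) : Decidable (Pre_arnold_decode matrix a b iterations) := by unfold Pre_arnold_decode; infer_instance

def pvWitness_arnold_decode : List (List Int) × Int × Int × Int := ([[1, 2], [3, 4]], 1, 1, 2)

def Spec_arnold_decode (matrix : List (List Int)) (a : Int) (b : Int) (iterations : Int) (out : List (List Int)) : Prop := out = arnold_decode_alt matrix a b iterations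
instance (matrix : List (List Int)) (a : Int) (b : Int) (iterations : Int) (out : List (List Int)) : Decidable (Spec_arnold_decode matrix a b iterations out) := by unfold Spec_arnold_decode; infer_instance

-- ===== CLAIM (what is proved, stated in full; the proofs are below) =====
def Claim_equal_arnold_decode : Prop := ∀ (matrix : List (List Int)) (a : Int) (b : Int) (iterations : Int), Dom_arnold_decode matrix a b iterations → Pre_arnold_decode matrix a b iterations → Spec_arnold_decode matrix a b iterations (arnold_decode matrix a b iterations)

-- ===== LEMMAS AND PROOFS =====

-- shape: square N x N, stated over getElem
def Shape (N : Nat) (m : List (List Int)) : Prop :=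
  m.length = N ∧ ∀ (k : Nat) (h : k < m.length), m[k].length = N

-- plain (un-reduced) 2x2 product and power
def pMul (P Q : (Int × Int) × (Int × Int)) : (Int × Int) × (Int × Int) :=
  ((P.1.1 * Q.1.1 + P.1.2 * Q.2.1, P.1.1 * Q.1.2 + P.1.2 * Q.2.2),
   (P.2.1 * Q.1.1 + P.2.2 * Q.2.1, P.2.1 * Q.1.2 + P.2.2 * Q.2.2))

def pPow (S : (Int × Int) × (Int × Int)) : Nat → (Int × Int) × (Int × Int)
  | 0 => ((1, 0), (0, 1))
  | k + 1 => pMul (pPow S k) S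

-- entrywise congruence mod N
def Eqm (N : Int) (P Q : (Int × Int) × (Int × Int)) : Prop :=
  P.1.1 % N = Q.1.1 % N ∧ P.1.2 % N = Q.1.2 % N ∧ P.2.1 % N = Q.2.1 % N ∧ P.2.2 % N = Q.2.2 % N

-- gather pass: out[u][v] = m[(P·(u,v)).1 mod N][(P·(u,v)).2 mod N]
def gatherM (N : Nat) (P : (Int × Int) × (Int × Int)) (m : List (List Int)) : List (List Int) :=
  (List.range N).map (fun (u : Nat) =>
    (List.range N).map (fun (v : Nat) =>
      pvGetCell m ((P.1.1 * (u : Int) + P.1.2 * (v : Int)) % (N : Int)).toNat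
        ((P.2.1 * (u : Int) + P.2.2 * (v : Int)) % (N : Int)).toNat))

theorem pMul_assoc (P Q R : (Int × Int) × (Int × Int)) :
    pMul (pMul P Q) R = pMul P (pMul Q R) := by
  simp only [pMul, Prod.mk.injEq]
  refine ⟨⟨by ring, by ring⟩, by ring, by ring⟩

theorem pMul_one (P : (Int × Int) × (Int × Int)) : pMul P ((1, 0), (0, 1)) = P := by
  simp only [pMul, mul_one, mul_zero, add_zero, zero_add]

theorem pPow_succ_left (S : (Int × Int) × (Int × Int)) (k : Nat) :
    pPow S (k + 1) = pMul S (pPow S k) := by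
  induction k with
  | zero => simp [pPow, pMul, mul_one, mul_zero, zero_mul, one_mul]
  | succ n ih =>
      show pMul (pPow S (n + 1)) S = pMul S (pPow S (n + 1))
      conv_lhs => rw [ih]
      rw [pMul_assoc]
      rfl

theorem pPow_two_mul (S : (Int × Int) × (Int × Int)) (m : Nat) :
    pPow (pMul S S) m = pPow S (2 * m) := by
  induction m with
  | zero => rfl
  | succ n ih =>
      show pMul (pPow (pMul S S) n) (pMul S S) = pPow S (2 * (n + 1))
      rw [ih, show 2 * (n + 1) = 2 * n + 1 + 1 from by ring, ← pMul_assoc]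
      rfl

theorem Eqm_refl (N : Int) (P : (Int × Int) × (Int × Int)) : Eqm N P P := ⟨rfl, rfl, rfl, rfl⟩

theorem Eqm_trans {N : Int} {P Q R : (Int × Int) × (Int × Int)} (h1 : Eqm N P Q) (h2 : Eqm N Q R) : Eqm N P R :=
  ⟨h1.1.trans h2.1, h1.2.1.trans h2.2.1, h1.2.2.1.trans h2.2.2.1, h1.2.2.2.trans h2.2.2.2⟩

-- pvMul equals the plain product entrywise mod N
theorem pvMul_eqm (N : Int) (P Q : (Int × Int) × (Int × Int)) : Eqm N (pvMul N P Q) (pMul P Q) := by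
  refine ⟨?_, ?_, ?_, ?_⟩ <;> exact Int.emod_emod_of_dvd _ dvd_rfl

theorem pMul_congr {N : Int} {P P' Q Q' : (Int × Int) × (Int × Int)}
    (hP : Eqm N P P') (hQ : Eqm N Q Q') : Eqm N (pMul P Q) (pMul P' Q') := by
  obtain ⟨p1, p2, p3, p4⟩ := hP
  obtain ⟨q1, q2, q3, q4⟩ := hQ
  refine ⟨?_, ?_, ?_, ?_⟩ <;>
    exact Int.ModEq.add (Int.ModEq.mul ‹_› ‹_›) (Int.ModEq.mul ‹_› ‹_›)

theorem pOne_mul (P : (Int × Int) × (Int × Int)) : pMul ((1, 0), (0, 1)) P = P := by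
  simp only [pMul, one_mul, zero_mul, add_zero, zero_add]

theorem pvBinpow_spec (N : Int) (k : Nat) : ∀ (P S P₀ S₀ : (Int × Int) × (Int × Int)),
    Eqm N P P₀ → Eqm N S S₀ → Eqm N (pvBinpow N P S k) (pMul P₀ (pPow S₀ k)) := by
  induction k using Nat.strong_induction_on with
  | _ k ih =>
    match k with
    | 0 =>
        intro P S P₀ S₀ hP _
        rw [show pvBinpow N P S 0 = P from by rw [pvBinpow],
          show pPow S₀ 0 = ((1, 0), (0, 1)) from rfl, pMul_one]
        exact hP
    | (n + 1) =>
        intro P S P₀ S₀ hP hS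
        rw [show pvBinpow N P S (n + 1)
            = pvBinpow N (if (n + 1) % 2 = 1 then pvMul N P S else P) (pvMul N S S) ((n + 1) / 2)
            from by rw [pvBinpow]]
        have hS2 : Eqm N (pvMul N S S) (pMul S₀ S₀) :=
          Eqm_trans (pvMul_eqm N S S) (pMul_congr hS hS)
        set h := (n + 1) / 2 with hh
        have hhalf : h < n + 1 := by omega
        by_cases hodd : (n + 1) % 2 = 1
        · rw [if_pos hodd]
          have hP' : Eqm N (pvMul N P S) (pMul P₀ S₀) :=
            Eqm_trans (pvMul_eqm N P S) (pMul_congr hP hS)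
          refine Eqm_trans (ih h hhalf _ _ _ _ hP' hS2) ?_
          rw [pPow_two_mul]
          have hk : n + 1 = 2 * h + 1 := by omega
          rw [hk, pMul_assoc, ← pPow_succ_left]
          exact Eqm_refl N _
        · rw [if_neg hodd]
          refine Eqm_trans (ih h hhalf _ _ _ _ hP hS2) ?_
          rw [pPow_two_mul]
          have hk : n + 1 = 2 * h := by omega
          rw [hk]
          exact Eqm_refl N _

-- forward scatter map of one A-iteration and its inverse, on [0,N)²
def fwd (a b : Int) (N : Nat) (p : Nat × Nat) : Nat × Nat :=
  ((((a * b + 1) * (p.1 : Int) - b * (p.2 : Int)) % (N : Int)).toNat,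
   ((-(a * (p.1 : Int)) + (p.2 : Int)) % (N : Int)).toNat)

def bwd (a b : Int) (N : Nat) (p : Nat × Nat) : Nat × Nat :=
  ((((p.1 : Int) + b * (p.2 : Int)) % (N : Int)).toNat,
   ((a * (p.1 : Int) + (a * b + 1) * (p.2 : Int)) % (N : Int)).toNat)

theorem emod_toNat_lt {N : Nat} (hN : 0 < N) (z : Int) : (z % (N : Int)).toNat < N := by
  have h1 : 0 ≤ z % (N : Int) := Int.emod_nonneg _ (by exact_mod_cast hN.ne')
  have h2 : z % (N : Int) < (N : Int) := Int.emod_lt_of_pos _ (by exact_mod_cast hN)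
  omega

theorem emod_toNat_cast {N : Nat} (hN : 0 < N) (z : Int) :
    (((z % (N : Int)).toNat : Int)) = z % (N : Int) :=
  Int.toNat_of_nonneg (Int.emod_nonneg _ (by exact_mod_cast hN.ne'))

theorem mod_lincomb (N x y c1 c2 : Int) :
    (c1 * (x % N) + c2 * (y % N)) % N = (c1 * x + c2 * y) % N := by
  have hx : x % N ≡ x [ZMOD N] := Int.emod_emod_of_dvd _ dvd_rfl
  have hy : y % N ≡ y [ZMOD N] := Int.emod_emod_of_dvd _ dvd_rfl
  exact Int.ModEq.add (Int.ModEq.mul_left c1 hx) (Int.ModEq.mul_left c2 hy)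

theorem mod_key {N : Nat} (hN : 0 < N) (c1 c2 X Y : Int) (r : Nat) (hr : r < N)
    (h : c1 * X + c2 * Y = (r : Int)) :
    ((c1 * (X % (N : Int)) + c2 * (Y % (N : Int))) % (N : Int)).toNat = r := by
  rw [mod_lincomb, h, Int.emod_eq_of_lt (Int.natCast_nonneg r) (by exact_mod_cast hr),
    Int.toNat_natCast]

theorem bwd_fwd {a b : Int} {N : Nat} (hN : 0 < N) (p : Nat × Nat)
    (h1 : p.1 < N) (h2 : p.2 < N) : bwd a b N (fwd a b N p) = p := by
  obtain ⟨x, y⟩ := p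
  simp only [fwd, bwd]
  rw [emod_toNat_cast hN, emod_toNat_cast hN]
  refine Prod.ext ?_ ?_
  · show ((((a * b + 1) * (x : Int) - b * (y : Int)) % (N : Int)
        + b * ((-(a * (x : Int)) + (y : Int)) % (N : Int))) % (N : Int)).toNat = x
    rw [show (((a * b + 1) * (x : Int) - b * (y : Int)) % (N : Int)
        + b * ((-(a * (x : Int)) + (y : Int)) % (N : Int)))
      = 1 * (((a * b + 1) * (x : Int) - b * (y : Int)) % (N : Int))
        + b * ((-(a * (x : Int)) + (y : Int)) % (N : Int)) from by ring]
    exact mod_key hN 1 b _ _ x h1 (by push_cast; ring)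
  · show ((a * ((((a * b + 1) * (x : Int) - b * (y : Int)) % (N : Int)))
        + (a * b + 1) * ((-(a * (x : Int)) + (y : Int)) % (N : Int))) % (N : Int)).toNat = y
    exact mod_key hN a (a * b + 1) _ _ y h2 (by push_cast; ring)

theorem fwd_bwd {a b : Int} {N : Nat} (hN : 0 < N) (p : Nat × Nat)
    (h1 : p.1 < N) (h2 : p.2 < N) : fwd a b N (bwd a b N p) = p := by
  obtain ⟨x, y⟩ := p
  simp only [fwd, bwd]
  rw [emod_toNat_cast hN, emod_toNat_cast hN]
  refine Prod.ext ?_ ?_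
  · show (((a * b + 1) * (((x : Int) + b * (y : Int)) % (N : Int))
        - b * ((a * (x : Int) + (a * b + 1) * (y : Int)) % (N : Int))) % (N : Int)).toNat = x
    rw [show ((a * b + 1) * (((x : Int) + b * (y : Int)) % (N : Int))
        - b * ((a * (x : Int) + (a * b + 1) * (y : Int)) % (N : Int)))
      = (a * b + 1) * (((x : Int) + b * (y : Int)) % (N : Int))
        + (-b) * ((a * (x : Int) + (a * b + 1) * (y : Int)) % (N : Int)) from by ring]
    exact mod_key hN (a * b + 1) (-b) _ _ x h1 (by push_cast; ring)
  · show ((-(a * (((x : Int) + b * (y : Int)) % (N : Int)))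
        + ((a * (x : Int) + (a * b + 1) * (y : Int)) % (N : Int))) % (N : Int)).toNat = y
    rw [show (-(a * (((x : Int) + b * (y : Int)) % (N : Int)))
        + ((a * (x : Int) + (a * b + 1) * (y : Int)) % (N : Int)))
      = (-a) * (((x : Int) + b * (y : Int)) % (N : Int))
        + 1 * ((a * (x : Int) + (a * b + 1) * (y : Int)) % (N : Int)) from by ring]
    exact mod_key hN (-a) 1 _ _ y h2 (by push_cast; ring)

def pairsL (N : Nat) : List (Nat × Nat) :=
  (List.range N).flatMap (fun x => (List.range N).map (fun y => (x, y)))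

def scatStep (a b : Int) (N : Nat) (m : List (List Int)) (acc : List (List Int))
    (p : Nat × Nat) : List (List Int) :=
  pvSetCell acc (fwd a b N p).1 (fwd a b N p).2 (pvGetCell m p.1 p.2)

theorem mem_pairsL {N : Nat} {p : Nat × Nat} : p ∈ pairsL N ↔ p.1 < N ∧ p.2 < N := by
  obtain ⟨x, y⟩ := p
  simp only [pairsL, List.mem_flatMap, List.mem_map, List.mem_range, Prod.mk.injEq]
  constructor
  · rintro ⟨x', hx', y', hy', rfl, rfl⟩; exact ⟨hx', hy'⟩
  · rintro ⟨hx, hy⟩; exact ⟨x, hx, y, hy, rfl, rfl⟩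

theorem stepA_eq_pairs (a b : Int) (N : Nat) (m : List (List Int)) :
    pvStepA a b N N N m
      = (pairsL N).foldl (scatStep a b N m) (List.replicate N (List.replicate N 0)) := by
  rw [pairsL, List.foldl_flatMap]
  unfold pvStepA
  congr 1
  funext acc x
  rw [List.foldl_map]
  rfl

theorem shape_replicate (N : Nat) : Shape N (List.replicate N (List.replicate N (0 : Int))) := by
  refine ⟨List.length_replicate, ?_⟩
  intro k h
  rw [List.getElem_replicate, List.length_replicate]

theorem shape_setCell {N : Nat} {m : List (List Int)} (h : Shape N m) (i j : Nat) (v : Int) :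
    Shape N (pvSetCell m i j v) := by
  refine ⟨by simpa [pvSetCell] using h.1, ?_⟩
  intro k hk
  unfold pvSetCell
  rw [List.getElem_set]
  split
  · next hik =>
      subst hik
      have hi : i < m.length := by simpa [pvSetCell] using hk
      rw [List.getD_eq_getElem _ _ hi, List.length_set]
      exact h.2 i hi
  · exact h.2 k (by simpa [pvSetCell] using hk)

theorem shape_scatter {a b : Int} {N : Nat} {m : List (List Int)} :
    ∀ (L : List (Nat × Nat)) (acc : List (List Int)), Shape N acc →
      Shape N (L.foldl (scatStep a b N m) acc) := by
  intro L
  induction L with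
  | nil => intro acc h; exact h
  | cons p L ih =>
      intro acc h
      exact ih _ (shape_setCell h _ _ _)

theorem getCell_setCell {N : Nat} {m : List (List Int)} (hsh : Shape N m) {i j u w : Nat}
    (hi : i < N) (hj : j < N) (hu : u < N) (hw : w < N) (v : Int) :
    pvGetCell (pvSetCell m i j v) u w = if i = u ∧ j = w then v else pvGetCell m u w := by
  have hi' : i < m.length := hsh.1 ▸ hi
  have hu' : u < m.length := hsh.1 ▸ hu
  have hrow : (m.getD i []) = m[i] := List.getD_eq_getElem _ _ hi'
  have hwi : w < m[i].length := by rw [hsh.2 i hi']; exact hw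
  have hwu : w < m[u].length := by rw [hsh.2 u hu']; exact hw
  unfold pvSetCell pvGetCell
  have h1 : (m.set i ((m.getD i []).set j v)).getD u []
      = if i = u then (m.getD i []).set j v else m[u] := by
    rw [List.getD_eq_getElem _ _ (by simpa using hu'), List.getElem_set]
  rw [h1]
  by_cases hiu : i = u
  · subst hiu
    rw [if_pos rfl, hrow,
      List.getD_eq_getElem _ _ (show w < (m[i].set j v).length by
        rw [List.length_set]; exact hwi), List.getElem_set,
      List.getD_eq_getElem _ _ hwi]
    by_cases hjw : j = w <;> simp [hjw]
  · rw [if_neg hiu, if_neg (by tauto), List.getD_eq_getElem _ _ hwu,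
      List.getD_eq_getElem _ _ hu', List.getD_eq_getElem _ _ hwu]

theorem find?_eq_of_unique {α : Type} (pred : α → Bool) (p₀ : α) :
    ∀ (L : List α), p₀ ∈ L → pred p₀ = true → (∀ q ∈ L, pred q = true → q = p₀) →
      L.find? pred = some p₀ := by
  intro L
  induction L with
  | nil => intro h; cases h
  | cons a L ih =>
      intro hm hp huniq
      by_cases ha : pred a = true
      · rw [List.find?_cons_of_pos ha]
        rw [huniq a List.mem_cons_self ha]
      · rw [List.find?_cons_of_neg ha]
        have hm' : p₀ ∈ L := by
          rcases List.mem_cons.mp hm with rfl | h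
          · exact absurd hp ha
          · exact h
        exact ih hm' hp (fun q hq => huniq q (List.mem_cons_of_mem _ hq))

theorem scatter_get {a b : Int} {N : Nat} (hN : 0 < N) (m : List (List Int)) :
    ∀ (L : List (Nat × Nat)) (acc : List (List Int)), Shape N acc →
      ∀ (u w : Nat), u < N → w < N →
        pvGetCell (L.foldl (scatStep a b N m) acc) u w =
          (match L.reverse.find? (fun p => (fwd a b N p).1 == u && (fwd a b N p).2 == w) with
           | some p => pvGetCell m p.1 p.2
           | none => pvGetCell acc u w) := by
  intro L
  induction L using List.reverseRecOn with
  | nil => intro acc hsh u w hu hw; simp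
  | append_singleton L p ih =>
      intro acc hsh u w hu hw
      rw [List.foldl_append, List.foldl_cons, List.foldl_nil, List.reverse_append,
        List.reverse_singleton, List.singleton_append, List.find?_cons]
      have hshL : Shape N (L.foldl (scatStep a b N m) acc) := shape_scatter L acc hsh
      have hfx : (fwd a b N p).1 < N := emod_toNat_lt hN _
      have hfy : (fwd a b N p).2 < N := emod_toNat_lt hN _
      have := getCell_setCell hshL hfx hfy hu hw (pvGetCell m p.1 p.2)
      rw [show scatStep a b N m (L.foldl (scatStep a b N m) acc) p
          = pvSetCell (L.foldl (scatStep a b N m) acc) (fwd a b N p).1 (fwd a b N p).2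
            (pvGetCell m p.1 p.2) from rfl, this]
      by_cases hp : ((fwd a b N p).1 == u && (fwd a b N p).2 == w) = true
      · have hpe : (fwd a b N p).1 = u ∧ (fwd a b N p).2 = w := by
          simpa using hp
        rw [if_pos hpe]
        simp only [hp]
      · have hpe : ¬ ((fwd a b N p).1 = u ∧ (fwd a b N p).2 = w) := by
          simpa using hp
        have hf : ((fwd a b N p).1 == u && (fwd a b N p).2 == w) = false := by
          simpa using hp
        rw [if_neg hpe]
        simp only [hf]
        exact ih acc hsh u w hu hw

theorem shape_canon {N : Nat} {m : List (List Int)} (hsh : Shape N m) :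
    m = (List.range N).map (fun u => (List.range N).map (fun w => pvGetCell m u w)) := by
  apply List.ext_getElem
  · simp [hsh.1]
  · intro i h1 h2
    apply List.ext_getElem
    · simpa using hsh.2 i h1
    · intro w hw1 hw2
      simp only [List.getElem_map, List.getElem_range]
      unfold pvGetCell
      rw [List.getD_eq_getElem _ _ h1, List.getD_eq_getElem _ _ hw1]

theorem gather_get {N : Nat} (P : (Int × Int) × (Int × Int)) (m : List (List Int)) {x y : Nat}
    (hx : x < N) (hy : y < N) :
    pvGetCell (gatherM N P m) x y
      = pvGetCell m ((P.1.1 * (x : Int) + P.1.2 * (y : Int)) % (N : Int)).toNat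
          ((P.2.1 * (x : Int) + P.2.2 * (y : Int)) % (N : Int)).toNat := by
  unfold gatherM pvGetCell
  simp [List.getD_eq_getElem?_getD, hx, hy]

theorem shape_gather {N : Nat} (P : (Int × Int) × (Int × Int)) (m : List (List Int)) :
    Shape N (gatherM N P m) := by
  refine ⟨by simp [gatherM], ?_⟩
  intro k h
  simp [gatherM]

theorem step_eq_gather {a b : Int} {N : Nat} (hN : 0 < N) {m : List (List Int)}
    (hsh : Shape N m) :
    pvStepA a b N N N m = gatherM N ((1, b), (a, a * b + 1)) m := by
  have hshS : Shape N (pvStepA a b N N N m) := by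
    rw [stepA_eq_pairs]; exact shape_scatter _ _ (shape_replicate N)
  rw [shape_canon hshS]
  unfold gatherM
  refine List.map_congr_left (fun u hu => ?_)
  refine List.map_congr_left (fun w hw => ?_)
  rw [List.mem_range] at hu hw
  rw [stepA_eq_pairs, scatter_get hN m _ _ (shape_replicate N) u w hu hw]
  have hfwd : fwd a b N (bwd a b N (u, w)) = (u, w) := fwd_bwd hN (u, w) hu hw
  have hfind : (pairsL N).reverse.find?
      (fun p => (fwd a b N p).1 == u && (fwd a b N p).2 == w) = some (bwd a b N (u, w)) := by
    apply find?_eq_of_unique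
    · rw [List.mem_reverse]
      exact mem_pairsL.mpr ⟨emod_toNat_lt hN _, emod_toNat_lt hN _⟩
    · rw [hfwd]; simp
    · intro q hq hpq
      have hqm := mem_pairsL.mp (List.mem_reverse.mp hq)
      have heq : fwd a b N q = (u, w) := by
        have := hpq
        simp only [Bool.and_eq_true, beq_iff_eq] at this
        exact Prod.ext this.1 this.2
      calc q = bwd a b N (fwd a b N q) := (bwd_fwd hN q hqm.1 hqm.2).symm
        _ = bwd a b N (u, w) := by rw [heq]
  rw [hfind]
  show pvGetCell m (bwd a b N (u, w)).1 (bwd a b N (u, w)).2 = _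
  simp only [bwd]
  rw [show (1 * (u : Int) + b * (w : Int)) = ((u : Int) + b * (w : Int)) from by ring]

theorem gather_gather {N : Nat} (hN : 0 < N) (P Q : (Int × Int) × (Int × Int))
    (m : List (List Int)) :
    gatherM N Q (gatherM N P m) = gatherM N (pMul P Q) m := by
  unfold gatherM
  refine List.map_congr_left (fun u hu => ?_)
  refine List.map_congr_left (fun w hw => ?_)
  rw [show ((List.range N).map (fun (u : Nat) => (List.range N).map (fun (v : Nat) =>
      pvGetCell m ((P.1.1 * (u : Int) + P.1.2 * (v : Int)) % (N : Int)).toNat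
        ((P.2.1 * (u : Int) + P.2.2 * (v : Int)) % (N : Int)).toNat)))
      = gatherM N P m from rfl]
  rw [gather_get P m (emod_toNat_lt hN _) (emod_toNat_lt hN _)]
  rw [emod_toNat_cast hN, emod_toNat_cast hN]
  rw [mod_lincomb, mod_lincomb]
  rw [show P.1.1 * (Q.1.1 * (u : Int) + Q.1.2 * (w : Int))
      + P.1.2 * (Q.2.1 * (u : Int) + Q.2.2 * (w : Int))
      = (P.1.1 * Q.1.1 + P.1.2 * Q.2.1) * (u : Int)
        + (P.1.1 * Q.1.2 + P.1.2 * Q.2.2) * (w : Int) from by ring]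
  rw [show P.2.1 * (Q.1.1 * (u : Int) + Q.1.2 * (w : Int))
      + P.2.2 * (Q.2.1 * (u : Int) + Q.2.2 * (w : Int))
      = (P.2.1 * Q.1.1 + P.2.2 * Q.2.1) * (u : Int)
        + (P.2.1 * Q.1.2 + P.2.2 * Q.2.2) * (w : Int) from by ring]
  rfl

theorem gather_congr {N : Nat} {P Q : (Int × Int) × (Int × Int)}
    (h : Eqm (N : Int) P Q) (m : List (List Int)) : gatherM N P m = gatherM N Q m := by
  unfold gatherM
  refine List.map_congr_left (fun u _ => ?_)
  refine List.map_congr_left (fun w _ => ?_)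
  obtain ⟨h1, h2, h3, h4⟩ := h
  rw [show (P.1.1 * (u : Int) + P.1.2 * (w : Int)) % (N : Int)
      = (Q.1.1 * (u : Int) + Q.1.2 * (w : Int)) % (N : Int) from
      Int.ModEq.add (Int.ModEq.mul_right _ h1) (Int.ModEq.mul_right _ h2),
    show (P.2.1 * (u : Int) + P.2.2 * (w : Int)) % (N : Int)
      = (Q.2.1 * (u : Int) + Q.2.2 * (w : Int)) % (N : Int) from
      Int.ModEq.add (Int.ModEq.mul_right _ h3) (Int.ModEq.mul_right _ h4)]

theorem gather_one {N : Nat} (hN : 0 < N) {m : List (List Int)} (hsh : Shape N m) :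
    gatherM N ((1, 0), (0, 1)) m = m := by
  conv_rhs => rw [shape_canon hsh]
  unfold gatherM
  refine List.map_congr_left (fun u hu => ?_)
  refine List.map_congr_left (fun w hw => ?_)
  rw [List.mem_range] at hu hw
  rw [show ((1 : Int) * (u : Int) + 0 * (w : Int)) = ((u : Int)) from by ring,
    show ((0 : Int) * (u : Int) + 1 * (w : Int)) = ((w : Int)) from by ring,
    Int.emod_eq_of_lt (Int.natCast_nonneg u) (by exact_mod_cast hu),
    Int.emod_eq_of_lt (Int.natCast_nonneg w) (by exact_mod_cast hw),
    Int.toNat_natCast, Int.toNat_natCast]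

theorem iter_gather {a b : Int} {N : Nat} (hN : 0 < N) {m : List (List Int)}
    (hsh : Shape N m) (k : Nat) :
    (fun mm => pvStepA a b N N N mm)^[k] m
      = gatherM N (pPow ((1, b), (a, a * b + 1)) k) m := by
  induction k with
  | zero =>
      rw [Function.iterate_zero_apply]
      exact (gather_one hN hsh).symm
  | succ n ihn =>
      rw [Function.iterate_succ_apply', ihn]
      show pvStepA a b N N N (gatherM N (pPow ((1, b), (a, a * b + 1)) n) m) = _
      rw [step_eq_gather hN (shape_gather _ _), gather_gather hN]
      rfl

-- ===== VERDICT (by name: the statement is the Claim_ definition above) =====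
theorem arnold_decode_spec : Claim_equal_arnold_decode := by
  intro matrix a b iterations _ hPre
  obtain ⟨hne, hco⟩ := hPre
  show arnold_decode matrix a b iterations = arnold_decode_alt matrix a b iterations
  by_cases hit : iterations ≤ 0
  · unfold arnold_decode arnold_decode_alt
    rw [if_pos hit]
    simp [Int.toNat_of_nonpos hit]
  · rcases hco with hle | ⟨hsq, hrows⟩
    · omega
    have hN : 0 < matrix.length := List.length_pos_iff.mpr hne
    have hhead : (matrix.headD []).length = matrix.length := hsq.symm
    have hsh : Shape matrix.length matrix :=
      ⟨rfl, fun k h => by rw [hrows matrix[k] (List.getElem_mem h), hhead]⟩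
    unfold arnold_decode arnold_decode_alt
    rw [if_neg hit]
    show (fun m => pvStepA a b matrix.length (matrix.headD []).length
        (matrix.headD []).length m)^[iterations.toNat] matrix = _
    rw [hhead, iter_gather hN hsh iterations.toNat]
    have hEqI : Eqm ((matrix.length : Nat) : Int)
        ((1 % ((matrix.length : Nat) : Int), 0), (0, 1 % ((matrix.length : Nat) : Int)))
        ((1, 0), (0, 1)) :=
      ⟨Int.emod_emod_of_dvd _ dvd_rfl, rfl, rfl, Int.emod_emod_of_dvd _ dvd_rfl⟩
    have hEqS : Eqm ((matrix.length : Nat) : Int)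
        ((1 % ((matrix.length : Nat) : Int), b % ((matrix.length : Nat) : Int)),
         (a % ((matrix.length : Nat) : Int), (a * b + 1) % ((matrix.length : Nat) : Int)))
        ((1, b), (a, a * b + 1)) :=
      ⟨Int.emod_emod_of_dvd _ dvd_rfl, Int.emod_emod_of_dvd _ dvd_rfl,
       Int.emod_emod_of_dvd _ dvd_rfl, Int.emod_emod_of_dvd _ dvd_rfl⟩
    have hbp := pvBinpow_spec ((matrix.length : Nat) : Int) iterations.toNat _ _ _ _ hEqI hEqS
    rw [pOne_mul] at hbp
    exact (gather_congr hbp matrix).symm
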